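-- pv_equiv track=rewrite | github.com/shrilakshmikakati/E-contract-to-smart-contract | src/nlp/business_relationship_extractor.py | _find_matching_entity
-- ===== SOURCE A (Python) =====
-- from typing import List, Dict, Any, Tuple, Set, Optional
--
-- def _find_matching_entity(text: str, entities: List[Dict[str, Any]]) -> Optional[Dict[str, Any]]:
--     """Find entity that best matches the given text"""
--     text_lower = text.lower().strip()
--
--     # Try exact match first
--     for entity in entities:
--         entity_text = entity.get('text', '').lower().strip()
--         if entity_text == text_lower:
--             return entity
--
--     # Try partial match
--     for entity in entities:
--         entity_text = entity.get('text', '').lower().strip()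
--         if entity_text and (entity_text in text_lower or text_lower in entity_text):
--             return entity
--
--     return None
-- ===== SOURCE B (Python) =====
-- from typing import List, Dict, Any, Optional
--
-- def _find_matching_entity(text: str, entities: List[Dict[str, Any]]) -> Optional[Dict[str, Any]]:
--     """Single pass: return on exact match immediately; remember the first partial match."""
--     text_lower = text.lower().strip()
--     first_partial = None
--     for entity in entities:
--         entity_text = entity.get('text', '').lower().strip()
--         if entity_text == text_lower:
--             return entity
--         if first_partial is None and entity_text and (entity_text in text_lower or text_lower in entity_text):
--             first_partial = entity
--     return first_partial
-- ===== Notes on version B (the rewrite author's own statement) =====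
-- stated objective: alternative
-- what changed: Replaced A's two sequential scans (one for exact matches, one for partial matches) with a single pass that returns immediately on an exact match and remembers the first partial match in an accumulator.
import Mathlib
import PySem

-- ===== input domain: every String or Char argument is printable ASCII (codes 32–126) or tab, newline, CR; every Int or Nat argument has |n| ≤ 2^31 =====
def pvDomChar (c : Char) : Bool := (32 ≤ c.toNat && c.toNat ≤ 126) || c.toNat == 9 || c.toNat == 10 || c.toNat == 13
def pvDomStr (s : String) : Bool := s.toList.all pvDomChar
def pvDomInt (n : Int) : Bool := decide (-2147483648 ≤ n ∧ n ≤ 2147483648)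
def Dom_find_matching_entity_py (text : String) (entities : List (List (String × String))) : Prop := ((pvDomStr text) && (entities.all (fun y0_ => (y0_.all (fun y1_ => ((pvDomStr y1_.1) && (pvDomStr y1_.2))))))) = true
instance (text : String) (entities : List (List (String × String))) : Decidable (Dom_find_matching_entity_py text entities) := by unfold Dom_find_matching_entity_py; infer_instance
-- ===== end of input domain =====

-- B fuses A's two scans into one pass with a first-partial accumulator; same result, single traversal (objective: alternative).

-- shared helper: entity.get('text', '').lower().strip()
def pvEntityText (e : List (String × String)) : String :=
  PySem.Str.strip (PySem.Str.lower ((PySem.Dict.mk e).getD "text" ""))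

-- ===== PORT A =====
-- first loop of A: exact match
def pvExactLoop (tl : String) : List (List (String × String)) → Option (List (String × String))
  | [] => none
  | e :: rest => if pvEntityText e == tl then some e else pvExactLoop tl rest

-- second loop of A: partial match
def pvPartialLoop (tl : String) : List (List (String × String)) → Option (List (String × String))
  | [] => none
  | e :: rest =>
      let et := pvEntityText e
      if et != "" && (PySem.Str.isIn et tl || PySem.Str.isIn tl et) then some e
      else pvPartialLoop tl rest

def find_matching_entity_py (text : String) (entities : List (List (String × String))) : Option (List (String × String)) :=
  let tl := PySem.Str.strip (PySem.Str.lower text)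
  match pvExactLoop tl entities with
  | some e => some e
  | none => pvPartialLoop tl entities

-- ===== PORT B =====
-- single loop of B: return on exact, remember first partial in the accumulator
def pvOneLoop (tl : String) (acc : Option (List (String × String))) :
    List (List (String × String)) → Option (List (String × String))
  | [] => acc
  | e :: rest =>
      let et := pvEntityText e
      if et == tl then some e
      else if acc.isNone && (et != "" && (PySem.Str.isIn et tl || PySem.Str.isIn tl et)) then
        pvOneLoop tl (some e) rest
      else pvOneLoop tl acc rest

def find_matching_entity_py_alt (text : String) (entities : List (List (String × String))) : Option (List (String × String)) :=
  pvOneLoop (PySem.Str.strip (PySem.Str.lower text)) none entities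

-- ===== PRECONDITION & SPEC =====
def Spec_find_matching_entity_py (text : String) (entities : List (List (String × String))) (out : Option (List (String × String))) : Prop := out = find_matching_entity_py_alt text entities
instance (text : String) (entities : List (List (String × String))) (out : Option (List (String × String))) : Decidable (Spec_find_matching_entity_py text entities out) := by unfold Spec_find_matching_entity_py; infer_instance

-- ===== CLAIM (what is proved, stated in full; the proofs are below) =====
def Claim_equal_find_matching_entity_py : Prop := ∀ (text : String) (entities : List (List (String × String))), Dom_find_matching_entity_py text entities → Spec_find_matching_entity_py text entities (find_matching_entity_py text entities)

-- ===== LEMMAS AND PROOFS =====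

-- Invariant of B's loop: it returns the first exact match if any; otherwise the
-- accumulator if set; otherwise the first partial match.
theorem pvOneLoop_eq (tl : String) (es : List (List (String × String)))
    (acc : Option (List (String × String))) :
    pvOneLoop tl acc es =
      match pvExactLoop tl es with
      | some e => some e
      | none => match acc with
        | some p => some p
        | none => pvPartialLoop tl es := by
  induction es generalizing acc with
  | nil => cases acc <;> simp [pvOneLoop, pvExactLoop, pvPartialLoop]
  | cons e rest ih =>
    simp only [pvOneLoop, pvExactLoop, pvPartialLoop]
    by_cases hx : (pvEntityText e == tl) = true
    · simp [hx]
    · simp only [hx, if_false, Bool.false_eq_true]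
      cases acc with
      | some p => simp only [Option.isNone_some, Bool.false_and,
          Bool.false_eq_true, if_false, ih]
      | none =>
        by_cases hp : (pvEntityText e != "" &&
            (PySem.Str.isIn (pvEntityText e) tl || PySem.Str.isIn tl (pvEntityText e))) = true
        · simp only [Option.isNone_none, Bool.true_and, hp, if_true, ih]
        · simp only [Option.isNone_none, Bool.true_and, hp, Bool.false_eq_true, if_false, ih]

-- ===== VERDICT (by name: the statement is the Claim_ definition above) =====
theorem find_matching_entity_py_spec : Claim_equal_find_matching_entity_py := by
  intro text entities _
  unfold Spec_find_matching_entity_py find_matching_entity_py find_matching_entity_py_alt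
  rw [pvOneLoop_eq]
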